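-- pv_equiv track=rewrite | github.com/neosizzle/gomoku | backend/example/static_eval_example/main.py | generate_diag_indices_inverse
-- ===== SOURCE A (Python) =====
-- def generate_diag_indices_inverse(board_size):
-- 	diag_indices = []
-- 	combs = board_size + (board_size - 1)
-- 	counter = 1
-- 	direction_up = True
-- 	for i in range(combs):
-- 		# start case, the first elem is always last elem of first row
-- 		if i == 0:
-- 			diag_indices.append([board_size - 1])
-- 			counter += 1
-- 			continue
--
-- 		smallest_elem = 0
-- 		# if direction is up, take the smallest of the last elemnt, else  2nd smallest
-- 		if direction_up:
-- 			smallest_elem = diag_indices[i - 1][0] - 1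
-- 		else:
-- 			smallest_elem = diag_indices[i - 1][1] - 1
--
-- 		# iterate through counter and append alements
-- 		buffer = []
-- 		for i in range(counter):
-- 			buffer.append(smallest_elem + (i * (board_size + 1)))
-- 		diag_indices.append(buffer)
--
-- 		# if direction is up, check for peak and increment counter. If peak reached, change direction and decrement counter
-- 		if direction_up:
-- 			if counter == board_size:
-- 				counter -= 1
-- 				direction_up = False
-- 			else:
-- 				counter += 1
--
-- 		# if direction is down, decrem counter
-- 		else:
-- 			counter -= 1
-- 	return diag_indices
-- ===== SOURCE B (Python) =====
-- def generate_diag_indices_inverse(board_size):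
--     n = board_size
--     return [[r * n + (r + d) for r in range(max(0, -d), min(n, n - d))]
--             for d in range(n - 1, -n, -1)]
-- ===== Notes on version B (the rewrite author's own statement) =====
-- stated objective: simpler
-- what changed: Each anti-diagonal is computed directly from its offset d (rows range(max(0,-d), min(n,n-d)) of a double comprehension) instead of incrementally from the previous diagonal with a counter and a direction flag.
import Mathlib
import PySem

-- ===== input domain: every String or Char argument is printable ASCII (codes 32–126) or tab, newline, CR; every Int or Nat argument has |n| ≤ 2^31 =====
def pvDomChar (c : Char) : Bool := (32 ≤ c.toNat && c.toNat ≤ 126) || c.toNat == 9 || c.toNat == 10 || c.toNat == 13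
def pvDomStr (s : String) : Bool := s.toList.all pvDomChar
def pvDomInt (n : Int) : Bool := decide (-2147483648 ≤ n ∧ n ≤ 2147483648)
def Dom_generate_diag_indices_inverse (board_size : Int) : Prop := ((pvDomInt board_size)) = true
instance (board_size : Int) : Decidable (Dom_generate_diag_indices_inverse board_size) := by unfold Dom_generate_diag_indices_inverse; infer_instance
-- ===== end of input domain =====

-- B computes each anti-diagonal directly from its offset instead of incrementally from
-- the previous diagonal with a counter and a direction flag (objective: simpler).

-- ===== PORT A =====
-- one iteration of A's main loop; state = (diag_indices, counter, direction_up).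
-- diag_indices[i-1], prev[0], prev[1] are ported with pyGetD; the indices are always
-- in range on the states the loop reaches, so A never raises and the defaults are unused.
def pyAStep (n : Int) (st : List (List Int) × Int × Bool) (i : Int) :
    List (List Int) × Int × Bool :=
  let acc := st.1
  let counter := st.2.1
  let dirUp := st.2.2
  if i = 0 then (acc ++ [[n - 1]], counter + 1, dirUp)
  else
    let prev := PySem.List.pyGetD acc (i - 1) []
    let smallest := if dirUp then PySem.List.pyGetD prev 0 0 - 1
                    else PySem.List.pyGetD prev 1 0 - 1
    let buffer := (PySem.List.pyRange 0 counter 1).foldl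
        (fun b j => b ++ [smallest + j * (n + 1)]) []
    let acc' := acc ++ [buffer]
    if dirUp then
      if counter = n then (acc', counter - 1, false) else (acc', counter + 1, dirUp)
    else (acc', counter - 1, dirUp)

def generate_diag_indices_inverse (board_size : Int) : List (List Int) :=
  let combs := board_size + (board_size - 1)
  ((PySem.List.pyRange 0 combs 1).foldl (pyAStep board_size) ([], 1, true)).1

-- ===== PORT B =====
def generate_diag_indices_inverse_alt (board_size : Int) : List (List Int) :=
  (PySem.List.pyRange (board_size - 1) (-board_size) (-1)).map (fun d =>
    (PySem.List.pyRange (max 0 (-d)) (min board_size (board_size - d)) 1).map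
      (fun r => r * board_size + (r + d)))

-- ===== PRECONDITION & SPEC =====
def Spec_generate_diag_indices_inverse (board_size : Int) (out : List (List Int)) : Prop := out = generate_diag_indices_inverse_alt board_size
instance (board_size : Int) (out : List (List Int)) : Decidable (Spec_generate_diag_indices_inverse board_size out) := by unfold Spec_generate_diag_indices_inverse; infer_instance

-- ===== CLAIM (what is proved, stated in full; the proofs are below) =====
def Claim_equal_generate_diag_indices_inverse : Prop := ∀ (board_size : Int), Dom_generate_diag_indices_inverse board_size → Spec_generate_diag_indices_inverse board_size (generate_diag_indices_inverse board_size)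

-- ===== LEMMAS AND PROOFS =====

-- the i-th anti-diagonal of an N×N board (i = 0 .. 2N-2), the value both programs produce
def diagA (N i : Nat) : List Int :=
  if i < N then
    (List.range (i + 1)).map (fun j : Nat => ((N : Int) - 1 - i) + (j : Int) * ((N : Int) + 1))
  else
    (List.range (2 * N - 1 - i)).map
      (fun j : Nat => ((i : Int) - ((N : Int) - 1)) * N + (j : Int) * ((N : Int) + 1))

-- the value of A's counter before iteration k
def ctrA (N k : Nat) : Int := if k < N then (k : Int) + 1 else 2 * (N : Int) - 1 - k

lemma pyRange_neg_one (a b : Int) (h : b < a) :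
    PySem.List.pyRange a b (-1) = (List.range (a - b).toNat).map (fun k : Nat => a - (k : Int)) := by
  unfold PySem.List.pyRange
  rw [if_neg (by norm_num : ¬ (-1:Int) = 0), if_neg (by norm_num : ¬ (0:Int) < -1), if_pos h,
      (by norm_num : (a - b + -(-1) - 1) / -(-1) = a - b)]
  exact List.map_congr_left fun k _ => by ring

lemma pyRange_one_eq (lo hi : Int) (h : lo ≤ hi) :
    PySem.List.pyRange lo hi 1 = (List.range (hi - lo).toNat).map (fun k : Nat => lo + k) := by
  rw [PySem.List.pyRange_of_pos _ _ Int.one_pos]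
  rcases lt_or_eq_of_le h with hlt | rfl
  · rw [if_pos hlt, (by omega : (hi - lo + 1 - 1) / 1 = hi - lo)]
    exact List.map_congr_left fun k _ => by ring
  · rw [if_neg (lt_irrefl lo), (by omega : (lo - lo).toNat = 0)]
    rfl

lemma inner_diag (N i : Nat) (hN : 1 ≤ N) (hi : i < 2 * N - 1) :
    (PySem.List.pyRange (max 0 (-((N : Int) - 1 - (i : Int))))
        (min (N : Int) ((N : Int) - ((N : Int) - 1 - (i : Int)))) 1).map
      (fun r => r * (N : Int) + (r + ((N : Int) - 1 - (i : Int)))) = diagA N i := by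
  by_cases hiN : i < N
  · rw [(by omega : max 0 (-((N : Int) - 1 - (i : Int))) = 0),
        (by omega : min (N : Int) ((N : Int) - ((N : Int) - 1 - (i : Int))) = (i : Int) + 1),
        pyRange_one_eq _ _ (by omega), (by omega : ((i : Int) + 1 - 0).toNat = i + 1),
        List.map_map, diagA, if_pos hiN]
    exact List.map_congr_left fun k _ => by simp only [Function.comp]; ring
  · rw [(by omega : max 0 (-((N : Int) - 1 - (i : Int))) = (i : Int) + 1 - (N : Int)),
        (by omega : min (N : Int) ((N : Int) - ((N : Int) - 1 - (i : Int))) = (N : Int)),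
        pyRange_one_eq _ _ (by omega),
        (by omega : ((N : Int) - ((i : Int) + 1 - (N : Int))).toNat = 2 * N - 1 - i),
        List.map_map, diagA, if_neg hiN]
    exact List.map_congr_left fun k _ => by simp only [Function.comp]; ring

lemma alt_eq_diag (N : Nat) (hN : 1 ≤ N) :
    generate_diag_indices_inverse_alt (N : Int) = (List.range (2 * N - 1)).map (diagA N) := by
  unfold generate_diag_indices_inverse_alt
  rw [pyRange_neg_one _ _ (by omega),
      (by omega : ((N : Int) - 1 - -(N : Int)).toNat = 2 * N - 1), List.map_map]
  refine List.map_congr_left (fun i hi => ?_)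
  rw [List.mem_range] at hi
  simp only [Function.comp]
  exact inner_diag N i hN hi

lemma buffer_eq (n smallest : Int) (c : Nat) :
    (PySem.List.pyRange 0 (c : Int) 1).foldl (fun b j => b ++ [smallest + j * (n + 1)]) []
      = (List.range c).map (fun j : Nat => smallest + (j : Int) * (n + 1)) := by
  rw [PySem.List.pyRange_zero_natCast, List.foldl_map]
  exact PySem.List.foldl_append_singleton_eq_map (fun j : Nat => smallest + (j : Int) * (n + 1)) _ []

lemma foldA_inv (N : Nat) (hN : 1 ≤ N) (k : Nat) (hk1 : 1 ≤ k) (hk2 : k ≤ 2 * N - 1) :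
    (((List.range k).foldl (fun st (j : Nat) => pyAStep (N : Int) st (j : Int)) ([], 1, true)).1
        = (List.range k).map (diagA N))
    ∧ (k < 2 * N - 1 →
        ((List.range k).foldl (fun st (j : Nat) => pyAStep (N : Int) st (j : Int)) ([], 1, true)).2.1 = ctrA N k
        ∧ ((List.range k).foldl (fun st (j : Nat) => pyAStep (N : Int) st (j : Int)) ([], 1, true)).2.2 = decide (k < N)) := by
  induction k with
  | zero => omega
  | succ k ih =>
    rcases Nat.eq_or_lt_of_le hk1 with h1 | h1
    · -- k + 1 = 1 : the first iteration (Python's i == 0 branch)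
      obtain rfl : k = 0 := by omega
      have h0N : 0 < N := hN
      refine ⟨?_, fun hlt => ?_⟩
      · show (pyAStep (N : Int) ([], 1, true) ((0:Nat) : Int)).1 = _
        rw [pyAStep]
        simp only [Nat.cast_zero, reduceIte]
        rw [List.range_one, List.map_cons, List.map_nil, diagA, if_pos h0N, List.range_one]
        simp
      · have h1N : 1 < N := by omega
        constructor
        · show (pyAStep (N : Int) ([], 1, true) ((0:Nat) : Int)).2.1 = ctrA N 1
          rw [pyAStep]
          simp only [Nat.cast_zero, reduceIte]
          rw [ctrA, if_pos h1N]
          norm_num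
        · show (pyAStep (N : Int) ([], 1, true) ((0:Nat) : Int)).2.2 = decide (1 < N)
          rw [pyAStep]
          simp only [Nat.cast_zero, reduceIte]
          simp [h1N]
    · -- k ≥ 1 : a generic iteration
      have hk : 1 ≤ k := by omega
      have hklt : k < 2 * N - 1 := by omega
      obtain ⟨ihacc, ihst⟩ := ih hk (by omega)
      obtain ⟨ihc, ihu⟩ := ihst hklt
      rw [List.range_succ, List.foldl_append, List.foldl_cons, List.foldl_nil]
      set st := (List.range k).foldl (fun st (j : Nat) => pyAStep (N : Int) st (j : Int)) ([], 1, true) with hst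
      have hne : ¬ ((k : Nat) : Int) = 0 := by omega
      have hprev : PySem.List.pyGetD st.1 ((k : Int) - 1) [] = diagA N (k - 1) := by
        rw [(by omega : ((k : Int) - 1) = ((k - 1 : Nat) : Int)), PySem.List.pyGetD_natCast,
            ihacc, PySem.List.getD_map_range _ _ _ _ (show k - 1 < k from by omega)]
      suffices h : ((pyAStep (N : Int) st ((k : Nat) : Int)).1 = List.map (diagA N) (List.range k ++ [k]))
          ∧ (pyAStep (N : Int) st ((k : Nat) : Int)).2.1 = ctrA N (k+1)
          ∧ (pyAStep (N : Int) st ((k : Nat) : Int)).2.2 = decide (k+1 < N) from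
        ⟨h.1, fun _ => ⟨h.2.1, h.2.2⟩⟩
      by_cases hkN : k < N
      · -- direction_up: the previous diagonal starts at N-1-(k-1), counter is k+1
        have hsm : (if st.2.2 then PySem.List.pyGetD (PySem.List.pyGetD st.1 ((k : Int) - 1) []) 0 0 - 1
            else PySem.List.pyGetD (PySem.List.pyGetD st.1 ((k : Int) - 1) []) 1 0 - 1) = (N : Int) - 1 - k := by
          rw [ihu, decide_eq_true hkN, if_pos rfl, hprev, diagA, if_pos (show k - 1 < N from by omega),
              PySem.List.pyGetD_ofNat', PySem.List.getD_map_range _ _ _ _ (show 0 < k - 1 + 1 from by omega)]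
          push_cast [show 1 ≤ k from hk]
          ring
        have hbuf : (PySem.List.pyRange 0 st.2.1 1).foldl
              (fun b j => b ++ [((N : Int) - 1 - k) + j * ((N : Int) + 1)]) [] = diagA N k := by
          rw [ihc, ctrA, if_pos hkN, (by push_cast; ring : ((k : Int) + 1) = ((k + 1 : Nat) : Int)),
              buffer_eq, diagA, if_pos hkN]
        rw [pyAStep]
        simp only [if_neg hne, hsm, hbuf]
        simp only [ihu, decide_eq_true hkN, reduceIte, ihc]
        rw [ctrA, if_pos hkN]
        rw [List.map_append, ← ihacc]
        by_cases hpk : (k : Int) + 1 = (N : Int)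
        · -- peak reached: direction flips
          have hnlt : ¬ (k + 1 < N) := by omega
          rw [if_pos hpk, ctrA, if_neg hnlt]
          refine ⟨rfl, ?_, ?_⟩
          · show (k : Int) + 1 - 1 = 2 * (N : Int) - 1 - (k + 1 : Nat)
            omega
          · show false = decide (k + 1 < N)
            simp [hnlt]
        · have hlt' : k + 1 < N := by omega
          rw [if_neg hpk, ctrA, if_pos hlt']
          refine ⟨rfl, ?_, ?_⟩
          · show (k : Int) + 1 + 1 = ((k + 1 : Nat) : Int) + 1
            push_cast; ring
          · show true = decide (k + 1 < N)
            simp [hlt']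
      · -- direction down: the previous diagonal's second element determines the start
        have hN2 : 2 ≤ N := by omega
        have hsm : (if st.2.2 then PySem.List.pyGetD (PySem.List.pyGetD st.1 ((k : Int) - 1) []) 0 0 - 1
            else PySem.List.pyGetD (PySem.List.pyGetD st.1 ((k : Int) - 1) []) 1 0 - 1)
            = ((k : Int) - ((N : Int) - 1)) * N := by
          rw [ihu, decide_eq_false hkN, if_neg (by simp), hprev, PySem.List.pyGetD_ofNat']
          by_cases hk1N : k - 1 < N
          · have hkEq : ((k : Nat) : Int) = (N : Int) := by omega
            rw [diagA, if_pos hk1N, PySem.List.getD_map_range _ _ _ _ (show 1 < k - 1 + 1 from by omega)]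
            push_cast [show 1 ≤ k from hk]
            rw [hkEq]
            ring
          · rw [diagA, if_neg hk1N,
                PySem.List.getD_map_range _ _ _ _ (show 1 < 2 * N - 1 - (k - 1) from by omega)]
            push_cast [show 1 ≤ k from hk, show N ≤ k - 1 from by omega, show N ≤ k from by omega]
            ring
        have hbuf : (PySem.List.pyRange 0 st.2.1 1).foldl
              (fun b j => b ++ [((k : Int) - ((N : Int) - 1)) * N + j * ((N : Int) + 1)]) [] = diagA N k := by
          rw [ihc, ctrA, if_neg hkN, (by omega : (2 * (N : Int) - 1 - (k : Int)) = ((2 * N - 1 - k : Nat) : Int)),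
              buffer_eq, diagA, if_neg hkN]
        rw [pyAStep]
        simp only [if_neg hne, hsm, hbuf]
        simp only [ihu, decide_eq_false hkN, Bool.false_eq_true, reduceIte, ihc]
        rw [ctrA, if_neg hkN]
        rw [List.map_append, ← ihacc]
        refine ⟨rfl, ?_, ?_⟩
        · show 2 * (N : Int) - 1 - (k : Int) - 1 = ctrA N (k + 1)
          rw [ctrA, if_neg (by omega : ¬ (k + 1 < N))]
          push_cast; ring
        · show false = decide (k + 1 < N)
          simp [show ¬ (k + 1 < N) from by omega]

lemma a_eq_diag (N : Nat) (hN : 1 ≤ N) :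
    generate_diag_indices_inverse (N : Int) = (List.range (2 * N - 1)).map (diagA N) := by
  unfold generate_diag_indices_inverse
  rw [(by omega : ((N : Int) + ((N : Int) - 1)) = ((2 * N - 1 : Nat) : Int))]
  show ((PySem.List.pyRange 0 ((2 * N - 1 : Nat) : Int) 1).foldl (pyAStep (N : Int)) ([], 1, true)).1 = _
  rw [PySem.List.pyRange_zero_natCast, List.foldl_map]
  exact (foldA_inv N hN (2 * N - 1) (by omega) le_rfl).1

-- ===== VERDICT (by name: the statement is the Claim_ definition above) =====
theorem generate_diag_indices_inverse_spec : Claim_equal_generate_diag_indices_inverse := by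
  intro n _
  unfold Spec_generate_diag_indices_inverse
  by_cases hn : n ≤ 0
  · -- board_size ≤ 0 : A's range(combs) and B's offset range are both empty
    have hA : PySem.List.pyRange 0 (n + (n - 1)) 1 = [] := by
      rw [PySem.List.pyRange_of_pos _ _ Int.one_pos,
          if_neg (by omega : ¬ (0 : Int) < n + (n - 1))]
      simp
    have hB : PySem.List.pyRange (n - 1) (-n) (-1) = [] := by
      unfold PySem.List.pyRange
      rw [if_neg (by norm_num : ¬ (-1 : Int) = 0), if_neg (by norm_num : ¬ (0 : Int) < -1),
          if_neg (by omega : ¬ -n < n - 1)]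
      simp
    simp [generate_diag_indices_inverse, generate_diag_indices_inverse_alt, hA, hB]
  · obtain ⟨N, rfl⟩ : ∃ N : Nat, n = (N : Int) := ⟨n.toNat, by omega⟩
    have hN : 1 ≤ N := by omega
    rw [a_eq_diag N hN, alt_eq_diag N hN]
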